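-- pv_equiv track=rewrite | github.com/tiu1234/cs505algo | StoneMatrix.py | stoneMatrix
-- ===== SOURCE A (Python) =====
-- def stoneMatrix(matrix):
--     count = 0
--
--     m = len(matrix)
--     n = len(matrix[0])
--     visited = [[0] * n for i in range(m)]
--
--     def bfs(a, b):
--         visited[a][b] = 1
--         queue = []
--
--         for i in range(m):
--             if matrix[i][b] == 1 and visited[i][b] == 0:
--                 visited[i][b] = 1
--                 queue.append((i, b))
--
--         for j in range(n):
--             if matrix[a][j] == 1 and visited[a][j] == 0:
--                 visited[a][j] = 1
--                 queue.append((a, j))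
--
--         for i, j in queue:
--             bfs(i, j)
--
--     for i in range(m):
--         for j in range(n):
--             if matrix[i][j] == 1 and visited[i][j] == 0:
--                 bfs(i, j)
--                 count += 1
--
--     return count
-- ===== SOURCE B (Python) =====
-- def stoneMatrix(matrix):
--     n = len(matrix[0])
--     comps = []  # one (rowset, colset) pair per connected component found so far
--     for i in range(len(matrix)):
--         row = matrix[i]
--         for j in range(n):
--             if row[j] == 1:
--                 rest = []
--                 rs, cs = {i}, {j}
--                 for rows, cols in comps:
--                     if i in rows or j in cols:
--                         rs |= rows
--                         cs |= cols
--                     else: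
--                         rest.append((rows, cols))
--                 rest.append((rs, cs))
--                 comps = rest
--     return len(comps)
-- ===== Notes on version B (the rewrite author's own statement) =====
-- stated objective: faster
-- what changed: A repeatedly rescans whole rows and columns in a recursive flood fill over a visited matrix; B makes one pass over the cells, keeping one (row-set, column-set) summary per component and merging the summaries that share the stone's row or column, so no cell is ever revisited.
import Mathlib
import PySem

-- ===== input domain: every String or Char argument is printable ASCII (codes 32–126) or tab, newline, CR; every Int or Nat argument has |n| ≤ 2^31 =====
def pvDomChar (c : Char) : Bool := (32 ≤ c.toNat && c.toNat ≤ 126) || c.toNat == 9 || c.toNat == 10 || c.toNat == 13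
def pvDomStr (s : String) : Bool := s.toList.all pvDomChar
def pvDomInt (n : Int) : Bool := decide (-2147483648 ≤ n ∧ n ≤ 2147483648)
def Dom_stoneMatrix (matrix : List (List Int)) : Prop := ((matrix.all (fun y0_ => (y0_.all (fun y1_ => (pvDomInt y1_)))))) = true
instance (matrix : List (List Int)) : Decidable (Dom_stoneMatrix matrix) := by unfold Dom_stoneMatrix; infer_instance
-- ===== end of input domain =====

-- B replaces A's recursive row/column flood fill by a single pass that merges
-- per-component (row-set, column-set) summaries; the returned counts are proved equal
-- on Pre_ (outside Pre_ the Python A raises IndexError).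

-- ===== PORT A =====
-- matrix[i][j] == 1 (indices come from range loops, hence non-negative; under Pre_
-- every access A performs is in range, so getD is exact there). The visited 0/1
-- matrix is represented by the finset of marked cells; bfs's recursion gets fuel
-- m*n+1, proved sufficient in pvBfs_main below.

def pvStone (matrix : List (List Int)) (i j : Nat) : Bool :=
  (matrix.getD i []).getD j 0 == 1

def pvMark (matrix : List (List Int)) (cells : List (Nat × Nat))
    (st : Finset (Nat × Nat) × List (Nat × Nat)) : Finset (Nat × Nat) × List (Nat × Nat) :=
  cells.foldl (fun st c =>
    if pvStone matrix c.1 c.2 ∧ c ∉ st.1 then (insert c st.1, st.2 ++ [c]) else st) st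

def pvBfs (matrix : List (List Int)) (m n : Nat) :
    Nat → Nat × Nat → Finset (Nat × Nat) → Finset (Nat × Nat)
  | 0, _, V => V
  | fuel + 1, p, V =>
    let st1 := pvMark matrix ((List.range m).map fun i => (i, p.2)) (insert p V, [])
    let st2 := pvMark matrix ((List.range n).map fun j => (p.1, j)) st1
    st2.2.foldl (fun V q => pvBfs matrix m n fuel q V) st2.1

def pvStepA (matrix : List (List Int)) (m n : Nat)
    (st : Int × Finset (Nat × Nat)) (i j : Nat) : Int × Finset (Nat × Nat) :=
  if pvStone matrix i j ∧ (i, j) ∉ st.2 then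
    (st.1 + 1, pvBfs matrix m n (m * n + 1) (i, j) st.2)
  else st

def stoneMatrix (matrix : List (List Int)) : Int :=
  let m := matrix.length
  let n := (matrix.headD []).length
  ((List.range m).foldl (fun st i =>
    (List.range n).foldl (fun st j => pvStepA matrix m n st i j) st)
    ((0 : Int), (∅ : Finset (Nat × Nat)))).1

-- ===== PORT B =====
-- process one cell: if it is a stone, merge all component summaries sharing its
-- row or column (Python's rest/rs/cs loop), else leave comps unchanged

def pvPlace (row : List Int) (comps : List (Finset Nat × Finset Nat)) (i j : Nat) :
    List (Finset Nat × Finset Nat) :=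
  if row.getD j 0 == 1 then
    let st := comps.foldl
      (fun (st : List (Finset Nat × Finset Nat) × Finset Nat × Finset Nat) c =>
        if i ∈ c.1 ∨ j ∈ c.2 then (st.1, st.2.1 ∪ c.1, st.2.2 ∪ c.2)
        else (st.1 ++ [c], st.2))
      ([], {i}, {j})
    st.1 ++ [(st.2.1, st.2.2)]
  else comps

-- does component summary c touch the cell (i, j)?

def stoneMatrix_alt (matrix : List (List Int)) : Int :=
  let n := (matrix.headD []).length
  ((List.range matrix.length).foldl (fun comps i =>
    let row := matrix.getD i []
    (List.range n).foldl (fun comps j => pvPlace row comps i j) comps) []).length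

-- ===== PRECONDITION & SPEC =====
-- Pre_ excludes exactly the inputs on which Python A raises IndexError: the empty
-- matrix (matrix[0]) and matrices with some row shorter than row 0 (matrix[i][j]).
def Pre_stoneMatrix (matrix : List (List Int)) : Prop :=
  matrix ≠ [] ∧ ∀ row ∈ matrix, (matrix.headD []).length ≤ row.length
instance (matrix : List (List Int)) : Decidable (Pre_stoneMatrix matrix) := by
  unfold Pre_stoneMatrix; infer_instance

def pvWitness_stoneMatrix : List (List Int) := [[1, 0], [0, 1]]

def Spec_stoneMatrix (matrix : List (List Int)) (out : Int) : Prop := out = stoneMatrix_alt matrix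
instance (matrix : List (List Int)) (out : Int) : Decidable (Spec_stoneMatrix matrix out) := by
  unfold Spec_stoneMatrix; infer_instance

-- ===== CLAIM (what is proved, stated in full; the proofs are below) =====
def Claim_equal_stoneMatrix : Prop := ∀ (matrix : List (List Int)), Dom_stoneMatrix matrix → Pre_stoneMatrix matrix → Spec_stoneMatrix matrix (stoneMatrix matrix)

-- ===== LEMMAS AND PROOFS =====
-- Both counts are proved equal to the number of reachability classes of the stone set
-- pvS matrix (stones are adjacent when they share a row or a column):
--   stoneMatrix_eq_card     : A's count = ((pvS matrix).image (pvCls (pvS matrix))).card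
--   stoneMatrix_alt_eq_card : B's count = the same cardinality

theorem pvMark_spec (matrix : List (List Int)) (cells : List (Nat × Nat)) :
    ∀ (V : Finset (Nat × Nat)) (q : List (Nat × Nat)),
    ∃ l : List (Nat × Nat),
      pvMark matrix cells (V, q) = (V ∪ l.toFinset, q ++ l) ∧
      (∀ c ∈ l, c ∈ cells ∧ pvStone matrix c.1 c.2 ∧ c ∉ V) ∧
      (∀ c ∈ cells, pvStone matrix c.1 c.2 → c ∈ V ∨ c ∈ l.toFinset) := by
  induction cells with
  | nil => intro V q; exact ⟨[], by simp [pvMark], by simp, by simp⟩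
  | cons c cs ih =>
    intro V q
    by_cases hc : pvStone matrix c.1 c.2 ∧ c ∉ V
    · obtain ⟨l, heq, hmem, hcov⟩ := ih (insert c V) (q ++ [c])
      refine ⟨c :: l, ?_, ?_, ?_⟩
      · simp only [pvMark, List.foldl_cons, if_pos hc] at heq ⊢
        rw [heq]
        have hset : insert c V ∪ l.toFinset = V ∪ (c :: l).toFinset := by
          simp [Finset.insert_union, Finset.union_insert]
        rw [hset]
        simp
      · intro x hx
        rcases List.mem_cons.1 hx with rfl | hx
        · exact ⟨List.mem_cons_self, hc.1, hc.2⟩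
        · obtain ⟨h1, h2, h3⟩ := hmem x hx
          exact ⟨List.mem_cons_of_mem _ h1, h2, fun hxV => h3 (Finset.mem_insert_of_mem hxV)⟩
      · intro x hx hst
        rcases List.mem_cons.1 hx with rfl | hx
        · right; simp
        · rcases hcov x hx hst with h | h
          · rcases Finset.mem_insert.1 h with rfl | h
            · right; simp
            · left; exact h
          · right; simp [h]
    · obtain ⟨l, heq, hmem, hcov⟩ := ih V q
      refine ⟨l, ?_, fun x hx => by
        obtain ⟨a, b2, d⟩ := hmem x hx; exact ⟨List.mem_cons_of_mem _ a, b2, d⟩, ?_⟩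
      · simp only [pvMark, List.foldl_cons, if_neg hc] at heq ⊢
        exact heq
      · intro x hx hst
        rcases List.mem_cons.1 hx with rfl | hx
        · left; rcases not_and_or.1 hc with h | h
          · exact absurd hst h
          · simpa using h
        · exact hcov x hx hst
  -- fix mem props: for cons-true case hmem entries claim c ∈ c::cs fine

def pvS (matrix : List (List Int)) : Finset (Nat × Nat) :=
  (Finset.range matrix.length ×ˢ Finset.range (matrix.headD []).length).filter
    (fun p => pvStone matrix p.1 p.2)

def pvNbr (p q : Nat × Nat) : Prop := p.1 = q.1 ∨ p.2 = q.2

def pvAdj (T : Finset (Nat × Nat)) (p q : Nat × Nat) : Prop := p ∈ T ∧ q ∈ T ∧ pvNbr p q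

def pvR (T : Finset (Nat × Nat)) : Nat × Nat → Nat × Nat → Prop :=
  Relation.ReflTransGen (pvAdj T)

theorem mem_pvS {matrix : List (List Int)} {p : Nat × Nat} :
    p ∈ pvS matrix ↔
      p.1 < matrix.length ∧ p.2 < (matrix.headD []).length ∧ pvStone matrix p.1 p.2 := by
  simp [pvS, Finset.mem_filter, Finset.mem_product, and_assoc]

theorem pvBfs_main (matrix : List (List Int)) :
    ∀ (fuel : Nat) (p : Nat × Nat) (V : Finset (Nat × Nat)),
      p ∈ pvS matrix → ((pvS matrix) \ insert p V).card < fuel →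
      insert p V ⊆ pvBfs matrix matrix.length (matrix.headD []).length fuel p V ∧
      (∀ x ∈ pvBfs matrix matrix.length (matrix.headD []).length fuel p V,
        x ∈ V ∨ pvR (pvS matrix) p x) ∧
      (∀ r ∈ pvS matrix, pvNbr p r →
        r ∈ pvBfs matrix matrix.length (matrix.headD []).length fuel p V) ∧
      (∀ x ∈ pvBfs matrix matrix.length (matrix.headD []).length fuel p V, x ∉ insert p V →
        x ∈ pvS matrix ∧ ∀ r ∈ pvS matrix, pvNbr x r →
          r ∈ pvBfs matrix matrix.length (matrix.headD []).length fuel p V) := by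
  intro fuel
  induction fuel with
  | zero => intro p V hp hcard; omega
  | succ fuel ih =>
    intro p V hp hcard
    obtain ⟨l1, h1, h1mem, h1cov⟩ :=
      pvMark_spec matrix ((List.range matrix.length).map fun i => (i, p.2)) (insert p V) []
    obtain ⟨l2, h2, h2mem, h2cov⟩ :=
      pvMark_spec matrix ((List.range (matrix.headD []).length).map fun j => (p.1, j))
        (insert p V ∪ l1.toFinset) l1
    set V3 : Finset (Nat × Nat) := (insert p V ∪ l1.toFinset) ∪ l2.toFinset with hV3
    set qs : List (Nat × Nat) := l1 ++ l2 with hqs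
    have hW : pvBfs matrix matrix.length (matrix.headD []).length (fuel + 1) p V =
        qs.foldl (fun V q => pvBfs matrix matrix.length (matrix.headD []).length fuel q V) V3 := by
      rw [pvBfs]
      simp only [h1, List.nil_append, h2]
    -- facts about the queue entries
    have hl1 : ∀ c ∈ l1, c ∈ pvS matrix ∧ c ∉ insert p V ∧ pvNbr p c := by
      intro c hc
      obtain ⟨hcell, hst, hnv⟩ := h1mem c hc
      obtain ⟨i, hi, rfl⟩ := List.mem_map.1 hcell
      refine ⟨mem_pvS.2 ⟨by simpa using hi, (mem_pvS.1 hp).2.1, hst⟩, hnv, Or.inr rfl⟩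
    have hl2 : ∀ c ∈ l2, c ∈ pvS matrix ∧ c ∉ insert p V ∧ pvNbr p c := by
      intro c hc
      obtain ⟨hcell, hst, hnv⟩ := h2mem c hc
      obtain ⟨j, hj, rfl⟩ := List.mem_map.1 hcell
      refine ⟨mem_pvS.2 ⟨(mem_pvS.1 hp).1, by simpa using hj, hst⟩,
        fun hx => hnv (Finset.mem_union_left _ hx), Or.inl rfl⟩
    have hqsS : ∀ c ∈ qs, c ∈ pvS matrix ∧ c ∉ insert p V ∧ pvNbr p c := by
      intro c hc
      rcases List.mem_append.1 hc with hc | hc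
      · exact hl1 c hc
      · exact hl2 c hc
    have hqsV3 : ∀ c ∈ qs, c ∈ V3 := by
      intro c hc
      rcases List.mem_append.1 hc with hc | hc
      · exact Finset.mem_union_left _ (Finset.mem_union_right _ (List.mem_toFinset.2 hc))
      · exact Finset.mem_union_right _ (List.mem_toFinset.2 hc)
    have hpV3 : insert p V ⊆ V3 := fun x hx =>
      Finset.mem_union_left _ (Finset.mem_union_left _ hx)
    -- every stone neighbouring p is covered by the two marking loops
    have hcover : ∀ r ∈ pvS matrix, pvNbr p r → r ∈ V3 := by
      rintro ⟨r1, r2⟩ hr hnbr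
      obtain ⟨hr1, hr2, hrst⟩ := mem_pvS.1 hr
      rcases hnbr with h | h
      · -- same row: covered by the row loop
        have hcell : (r1, r2) ∈ (List.range (matrix.headD []).length).map fun j => (p.1, j) := by
          refine List.mem_map.2 ⟨r2, by simpa using hr2, ?_⟩
          rw [h]
        rcases h2cov _ hcell hrst with hin | hin
        · exact Finset.mem_union_left _ hin
        · exact Finset.mem_union_right _ hin
      · -- same column: covered by the column loop
        have hcell : (r1, r2) ∈ (List.range matrix.length).map fun i => (i, p.2) := by
          refine List.mem_map.2 ⟨r1, by simpa using hr1, ?_⟩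
          rw [h]
        rcases h1cov _ hcell hrst with hin | hin
        · exact hpV3 hin
        · exact Finset.mem_union_left _ (Finset.mem_union_right _ hin)
    by_cases hq0 : qs = []
    · -- nothing new was marked
      have hl12 := List.append_eq_nil_iff.1 (hqs ▸ hq0)
      have hV3eq : V3 = insert p V := by simp [hV3, hl12.1, hl12.2]
      rw [hW, hq0]
      simp only [List.foldl_nil, hV3eq]
      refine ⟨Finset.Subset.refl _, ?_, ?_, ?_⟩
      · intro x hx
        rcases Finset.mem_insert.1 hx with rfl | hx
        · exact Or.inr Relation.ReflTransGen.refl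
        · exact Or.inl hx
      · intro r hr hnbr; exact hV3eq ▸ hcover r hr hnbr
      · intro x hx hnx; exact absurd hx hnx
    · -- at least one new cell was marked: fuel accounting and the worklist
      obtain ⟨q0, hq0mem⟩ := List.exists_mem_of_ne_nil _ hq0
      have hq0f : q0 ∈ (pvS matrix) \ insert p V := by
        obtain ⟨hS, hnV, _⟩ := hqsS q0 hq0mem
        exact Finset.mem_sdiff.2 ⟨hS, hnV⟩
      have hcard3 : ((pvS matrix) \ V3).card < fuel := by
        have hsub : (pvS matrix) \ V3 ⊆ ((pvS matrix) \ insert p V).erase q0 := by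
          intro x hx
          obtain ⟨hxS, hxV3⟩ := Finset.mem_sdiff.1 hx
          refine Finset.mem_erase.2 ⟨?_, Finset.mem_sdiff.2 ⟨hxS, fun hin => hxV3 (hpV3 hin)⟩⟩
          rintro rfl; exact hxV3 (hqsV3 _ hq0mem)
        have hc1 := Finset.card_le_card hsub
        have hc2 := Finset.card_erase_of_mem hq0f
        have hc3 : 0 < ((pvS matrix) \ insert p V).card := Finset.card_pos.2 ⟨q0, hq0f⟩
        omega
      -- the worklist lemma
      have fold : ∀ (todo : List (Nat × Nat)) (V' : Finset (Nat × Nat)),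
          (∀ q ∈ todo, q ∈ pvS matrix ∧ q ∈ V') → ((pvS matrix) \ V').card < fuel →
          V' ⊆ todo.foldl (fun V q => pvBfs matrix matrix.length (matrix.headD []).length fuel q V) V' ∧
          (∀ x ∈ todo.foldl (fun V q => pvBfs matrix matrix.length (matrix.headD []).length fuel q V) V',
            x ∈ V' ∨ ∃ q ∈ todo, pvR (pvS matrix) q x) ∧
          (∀ q ∈ todo, ∀ r ∈ pvS matrix, pvNbr q r →
            r ∈ todo.foldl (fun V q => pvBfs matrix matrix.length (matrix.headD []).length fuel q V) V') ∧
          (∀ x ∈ todo.foldl (fun V q => pvBfs matrix matrix.length (matrix.headD []).length fuel q V) V',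
            x ∉ V' → x ∈ pvS matrix ∧ ∀ r ∈ pvS matrix, pvNbr x r →
              r ∈ todo.foldl (fun V q => pvBfs matrix matrix.length (matrix.headD []).length fuel q V) V') := by
        intro todo
        induction todo with
        | nil =>
          intro V' _ _
          simp only [List.foldl_nil]
          exact ⟨Finset.Subset.refl _, fun x hx => Or.inl hx, fun q hq => absurd hq (List.not_mem_nil),
            fun x hx hnx => absurd hx hnx⟩
        | cons t ts iht =>
          intro V' htodo hcard'
          obtain ⟨htS, htV⟩ := htodo t List.mem_cons_self
          have hins : insert t V' = V' := Finset.insert_eq_self.2 htV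
          obtain ⟨a1, a2, a3, a4⟩ := ih t V' htS (by rw [hins]; exact hcard')
          set W1 := pvBfs matrix matrix.length (matrix.headD []).length fuel t V' with hW1
          have hsubW1 : V' ⊆ W1 := by rw [← hins]; exact a1
          obtain ⟨b1, b2, b3, b4⟩ := iht W1
            (fun q hq => ⟨(htodo q (List.mem_cons_of_mem _ hq)).1,
              hsubW1 (htodo q (List.mem_cons_of_mem _ hq)).2⟩)
            (lt_of_le_of_lt (Finset.card_le_card (fun x hx => by
              obtain ⟨hxS, hxV⟩ := Finset.mem_sdiff.1 hx
              exact Finset.mem_sdiff.2 ⟨hxS, fun h => hxV (hsubW1 h)⟩)) hcard')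
          simp only [List.foldl_cons, ← hW1]
          refine ⟨hsubW1.trans b1, ?_, ?_, ?_⟩
          · intro x hx
            rcases b2 x hx with hx1 | ⟨q, hq, hr⟩
            · rcases a2 x hx1 with hx2 | hr
              · exact Or.inl hx2
              · exact Or.inr ⟨t, List.mem_cons_self, hr⟩
            · exact Or.inr ⟨q, List.mem_cons_of_mem _ hq, hr⟩
          · intro q hq r hr hnbr
            rcases List.mem_cons.1 hq with rfl | hq
            · exact b1 (a3 r hr hnbr)
            · exact b3 q hq r hr hnbr
          · intro x hx hnx
            by_cases hx1 : x ∈ W1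
            · have hx2 : x ∉ insert t V' := by rw [hins]; exact hnx
              obtain ⟨hxS, hexp⟩ := a4 x hx1 hx2
              exact ⟨hxS, fun r hr hnbr => b1 (hexp r hr hnbr)⟩
            · obtain ⟨hxS, hexp⟩ := b4 x hx hx1
              exact ⟨hxS, hexp⟩
      obtain ⟨f1, f2, f3, f4⟩ := fold qs V3 (fun q hq => ⟨(hqsS q hq).1, hqsV3 q hq⟩) hcard3
      rw [hW]
      refine ⟨hpV3.trans f1, ?_, ?_, ?_⟩
      · -- everything reached is V or connected to p
        intro x hx
        rcases f2 x hx with hx3 | ⟨q, hq, hr⟩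
        · rcases Finset.mem_union.1 hx3 with hx3 | hx3
          · rcases Finset.mem_union.1 hx3 with hx3 | hx3
            · rcases Finset.mem_insert.1 hx3 with rfl | hx3
              · exact Or.inr Relation.ReflTransGen.refl
              · exact Or.inl hx3
            · obtain ⟨hS, _, hnbr⟩ := hl1 x (List.mem_toFinset.1 hx3)
              exact Or.inr (Relation.ReflTransGen.single ⟨hp, hS, hnbr⟩)
          · obtain ⟨hS, _, hnbr⟩ := hl2 x (List.mem_toFinset.1 hx3)
            exact Or.inr (Relation.ReflTransGen.single ⟨hp, hS, hnbr⟩)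
        · obtain ⟨hS, _, hnbr⟩ := hqsS q hq
          exact Or.inr ((Relation.ReflTransGen.single ⟨hp, hS, hnbr⟩).trans hr)
      · intro r hr hnbr
        exact f1 (hcover r hr hnbr)
      · intro x hx hnx
        by_cases hx3 : x ∈ V3
        · have hxqs : x ∈ qs := by
            rcases Finset.mem_union.1 hx3 with h | h
            · rcases Finset.mem_union.1 h with h | h
              · exact absurd h hnx
              · exact List.mem_append.2 (Or.inl (List.mem_toFinset.1 h))
            · exact List.mem_append.2 (Or.inr (List.mem_toFinset.1 h))
          exact ⟨(hqsS x hxqs).1, fun r hr hnbr => f3 x hxqs r hr hnbr⟩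
        · exact f4 x hx hx3

noncomputable def pvCls (T : Finset (Nat × Nat)) (p : Nat × Nat) : Finset (Nat × Nat) :=
  @Finset.filter _ (fun q => pvR T p q) (Classical.decPred _) T

theorem pvNbr_symm {p q : Nat × Nat} (h : pvNbr p q) : pvNbr q p := by
  unfold pvNbr at *; omega

theorem pvAdj_symm {T : Finset (Nat × Nat)} : Symmetric (pvAdj T) := by
  intro p q ⟨hp, hq, hn⟩; exact ⟨hq, hp, pvNbr_symm hn⟩

theorem pvR_symm {T : Finset (Nat × Nat)} {p q : Nat × Nat} (h : pvR T p q) : pvR T q p :=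
  (Relation.ReflTransGen.symmetric pvAdj_symm) h

theorem pvR_mem {T : Finset (Nat × Nat)} {p q : Nat × Nat} (h : pvR T p q) : q = p ∨ q ∈ T := by
  induction h with
  | refl => exact Or.inl rfl
  | tail _ hadj _ => exact Or.inr hadj.2.1

theorem mem_pvCls {T : Finset (Nat × Nat)} {p q : Nat × Nat} :
    q ∈ pvCls T p ↔ q ∈ T ∧ pvR T p q := by
  unfold pvCls; rw [@Finset.mem_filter _ _ (Classical.decPred _)]

theorem pvCls_eq_of_R {T : Finset (Nat × Nat)} {p q : Nat × Nat} (h : pvR T p q) :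
    pvCls T p = pvCls T q := by
  ext x; rw [mem_pvCls, mem_pvCls]
  exact ⟨fun ⟨hx, hr⟩ => ⟨hx, ((pvR_symm h).trans hr)⟩, fun ⟨hx, hr⟩ => ⟨hx, h.trans hr⟩⟩

theorem mem_pvCls_self {T : Finset (Nat × Nat)} {p : Nat × Nat} (h : p ∈ T) : p ∈ pvCls T p :=
  mem_pvCls.2 ⟨h, Relation.ReflTransGen.refl⟩

-- closed sets absorb reachability

def pvClosed (matrix : List (List Int)) (V : Finset (Nat × Nat)) : Prop :=
  ∀ x ∈ V, ∀ q ∈ pvS matrix, pvNbr x q → q ∈ V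

theorem pvClosed_R {matrix : List (List Int)} {V : Finset (Nat × Nat)}
    (hV : pvClosed matrix V) {x y : Nat × Nat} (hx : x ∈ V) (h : pvR (pvS matrix) x y) :
    y ∈ V := by
  induction h with
  | refl => exact hx
  | tail _ hadj ih => exact hV _ ih _ hadj.2.1 hadj.2.2

def InvA (matrix : List (List Int)) (st : Int × Finset (Nat × Nat)) : Prop :=
  st.2 ⊆ pvS matrix ∧ pvClosed matrix st.2 ∧
    st.1 = ((st.2.image (pvCls (pvS matrix))).card : Int)

theorem pvStepA_inv (matrix : List (List Int)) (st : Int × Finset (Nat × Nat)) (p : Nat × Nat)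
    (hp1 : p.1 < matrix.length) (hp2 : p.2 < (matrix.headD []).length)
    (hinv : InvA matrix st) :
    InvA matrix (pvStepA matrix matrix.length (matrix.headD []).length st p.1 p.2) ∧
    st.2 ⊆ (pvStepA matrix matrix.length (matrix.headD []).length st p.1 p.2).2 ∧
    (p ∈ pvS matrix → p ∈ (pvStepA matrix matrix.length (matrix.headD []).length st p.1 p.2).2) := by
  obtain ⟨hsub, hclosed, hcnt⟩ := hinv
  unfold pvStepA
  by_cases hc : pvStone matrix p.1 p.2 ∧ (p.1, p.2) ∉ st.2
  · rw [if_pos hc]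
    have hpS : p ∈ pvS matrix := mem_pvS.2 ⟨hp1, hp2, hc.1⟩
    have hpV : p ∉ st.2 := by
      intro h; exact hc.2 (by simpa using h)
    have hfuel : ((pvS matrix) \ insert p st.2).card <
        matrix.length * (matrix.headD []).length + 1 := by
      have h1 : ((pvS matrix) \ insert p st.2).card ≤ (pvS matrix).card :=
        Finset.card_le_card (Finset.sdiff_subset)
      have h2 : (pvS matrix).card ≤ matrix.length * (matrix.headD []).length := by
        calc (pvS matrix).card
            ≤ (Finset.range matrix.length ×ˢ Finset.range (matrix.headD []).length).card :=
              Finset.card_le_card (Finset.filter_subset _ _)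
          _ = matrix.length * (matrix.headD []).length := by
              rw [Finset.card_product, Finset.card_range, Finset.card_range]
      omega
    obtain ⟨a1, a2, a3, a4⟩ := pvBfs_main matrix _ p st.2 hpS hfuel
    set W := pvBfs matrix matrix.length (matrix.headD []).length
      (matrix.length * (matrix.headD []).length + 1) p st.2 with hWdef
    have hVW : st.2 ⊆ W := fun x hx => a1 (Finset.mem_insert_of_mem hx)
    have hpW : p ∈ W := a1 (Finset.mem_insert_self _ _)
    -- W is exactly st.2 together with the class of p
    have key : ∀ y, pvR (pvS matrix) p y → y ∈ W ∧ y ∉ st.2 := by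
      intro y hy
      induction hy with
      | refl => exact ⟨hpW, hpV⟩
      | @tail b c hxy hadj ihy =>
        obtain ⟨hbW, hbV⟩ := ihy
        constructor
        · by_cases hins : b ∈ insert p st.2
          · rcases Finset.mem_insert.1 hins with heq | hin
            · subst heq; exact a3 _ hadj.2.1 hadj.2.2
            · exact absurd hin hbV
          · exact (a4 _ hbW hins).2 _ hadj.2.1 hadj.2.2
        · intro hcV
          exact hbV (hclosed _ hcV _ hadj.1 (pvNbr_symm hadj.2.2))
    have hWeq : W = st.2 ∪ pvCls (pvS matrix) p := by
      apply Finset.Subset.antisymm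
      · intro x hx
        rcases a2 x hx with hx | hr
        · exact Finset.mem_union_left _ hx
        · rcases pvR_mem hr with rfl | hxS
          · exact Finset.mem_union_right _ (mem_pvCls_self hpS)
          · exact Finset.mem_union_right _ (mem_pvCls.2 ⟨hxS, hr⟩)
      · intro x hx
        rcases Finset.mem_union.1 hx with hx | hx
        · exact hVW hx
        · exact (key x (mem_pvCls.1 hx).2).1
    refine ⟨⟨?_, ?_, ?_⟩, hVW, fun _ => hpW⟩
    · -- W ⊆ S
      rw [hWeq]
      exact Finset.union_subset hsub (fun x hx => (mem_pvCls.1 hx).1)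
    · -- W closed
      intro x hxW r hrS hnbr
      by_cases hxV : x ∈ st.2
      · exact hVW (hclosed x hxV r hrS hnbr)
      · by_cases hins : x ∈ insert p st.2
        · rcases Finset.mem_insert.1 hins with heq | hin
          · subst heq; exact a3 r hrS hnbr
          · exact absurd hin hxV
        · exact (a4 x hxW hins).2 r hrS hnbr
    · -- the count goes up by exactly one
      show st.1 + 1 = ((W.image (pvCls (pvS matrix))).card : Int)
      have himg : (pvCls (pvS matrix) p).image (pvCls (pvS matrix)) = {pvCls (pvS matrix) p} := by
        apply Finset.Subset.antisymm
        · intro y hy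
          obtain ⟨x, hx, rfl⟩ := Finset.mem_image.1 hy
          simpa using (pvCls_eq_of_R (mem_pvCls.1 hx).2).symm
        · intro y hy
          rw [Finset.mem_singleton.1 hy]
          exact Finset.mem_image.2 ⟨p, mem_pvCls_self hpS, rfl⟩
      have hnotmem : pvCls (pvS matrix) p ∉ st.2.image (pvCls (pvS matrix)) := by
        intro hmem
        obtain ⟨x, hxV, hcx⟩ := Finset.mem_image.1 hmem
        have hpx : p ∈ pvCls (pvS matrix) x := hcx ▸ mem_pvCls_self hpS
        exact hpV (pvClosed_R hclosed hxV (mem_pvCls.1 hpx).2)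
      rw [hWeq, Finset.image_union, himg, Finset.union_singleton,
        Finset.card_insert_of_notMem hnotmem, hcnt]
      push_cast
      ring
  · rw [if_neg hc]
    refine ⟨⟨hsub, hclosed, hcnt⟩, Finset.Subset.refl _, ?_⟩
    intro hpS
    rcases not_and_or.1 hc with h | h
    · exact absurd (mem_pvS.1 hpS).2.2 h
    · simpa using not_not.1 h

theorem foldl_nested {α β σ : Type} (g : σ → α → β → σ) :
    ∀ (l1 : List α) (l2 : List β) (init : σ),
      l1.foldl (fun st a => l2.foldl (fun st b => g st a b) st) init =
        (l1.flatMap fun a => l2.map fun b => (a, b)).foldl (fun st p => g st p.1 p.2) init := by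
  intro l1
  induction l1 with
  | nil => intro l2 init; simp
  | cons a l1 ih =>
    intro l2 init
    simp only [List.foldl_cons, List.flatMap_cons, List.foldl_append, ih, List.foldl_map]

theorem loopA (matrix : List (List Int)) :
    ∀ (cells : List (Nat × Nat)) (st : Int × Finset (Nat × Nat)),
      InvA matrix st →
      (∀ p ∈ cells, p.1 < matrix.length ∧ p.2 < (matrix.headD []).length) →
      InvA matrix (cells.foldl (fun st p =>
        pvStepA matrix matrix.length (matrix.headD []).length st p.1 p.2) st) ∧
      st.2 ⊆ (cells.foldl (fun st p =>
        pvStepA matrix matrix.length (matrix.headD []).length st p.1 p.2) st).2 ∧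
      (∀ p ∈ cells, p ∈ pvS matrix → p ∈ (cells.foldl (fun st p =>
        pvStepA matrix matrix.length (matrix.headD []).length st p.1 p.2) st).2) := by
  intro cells
  induction cells with
  | nil =>
    intro st hinv _
    exact ⟨hinv, Finset.Subset.refl _, fun p hp => absurd hp (List.not_mem_nil)⟩
  | cons c cs ih =>
    intro st hinv hcells
    obtain ⟨h1, h2⟩ := hcells c List.mem_cons_self
    obtain ⟨hinv', hsub', hmem'⟩ := pvStepA_inv matrix st c h1 h2 hinv
    obtain ⟨binv, bsub, bmem⟩ := ih _ hinv' (fun p hp => hcells p (List.mem_cons_of_mem _ hp))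
    simp only [List.foldl_cons]
    refine ⟨binv, hsub'.trans bsub, ?_⟩
    intro p hp hpS
    rcases List.mem_cons.1 hp with rfl | hp
    · exact bsub (hmem' hpS)
    · exact bmem p hp hpS

theorem stoneMatrix_eq_card (matrix : List (List Int)) :
    stoneMatrix matrix = (((pvS matrix).image (pvCls (pvS matrix))).card : Int) := by
  show ((List.range matrix.length).foldl (fun st i =>
    (List.range (matrix.headD []).length).foldl (fun st j =>
      pvStepA matrix matrix.length (matrix.headD []).length st i j) st)
    ((0 : Int), (∅ : Finset (Nat × Nat)))).1 = _
  rw [foldl_nested (fun st i j => pvStepA matrix matrix.length (matrix.headD []).length st i j)]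
  set cells := (List.range matrix.length).flatMap
    (fun a => (List.range (matrix.headD []).length).map fun b => (a, b)) with hcells
  have hmemcells : ∀ p : Nat × Nat,
      p ∈ cells ↔ p.1 < matrix.length ∧ p.2 < (matrix.headD []).length := by
    rintro ⟨a, b⟩
    simp [hcells, List.mem_flatMap]
  obtain ⟨⟨hsub, hclosed, hcnt⟩, _, hall⟩ :=
    loopA matrix cells ((0 : Int), (∅ : Finset (Nat × Nat)))
      ⟨by simp, by intro x hx; simp at hx, by simp⟩
      (fun p hp => (hmemcells p).1 hp)
  have hVS : (cells.foldl (fun st p =>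
      pvStepA matrix matrix.length (matrix.headD []).length st p.1 p.2)
      ((0 : Int), (∅ : Finset (Nat × Nat)))).2 = pvS matrix := by
    apply Finset.Subset.antisymm hsub
    intro p hpS
    have hp := mem_pvS.1 hpS
    exact hall p ((hmemcells p).2 ⟨hp.1, hp.2.1⟩) hpS
  rw [hcnt, hVS]

-- ---------- B-side proof ----------

theorem pvR_mono {T T' : Finset (Nat × Nat)} (h : T ⊆ T') {p q : Nat × Nat} (hr : pvR T p q) :
    pvR T' p q := by
  induction hr with
  | refl => exact Relation.ReflTransGen.refl
  | tail _ hadj ih => exact ih.tail ⟨h hadj.1, h hadj.2.1, hadj.2.2⟩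

theorem pvR_insert_untouched {T : Finset (Nat × Nat)} {p t : Nat × Nat}
    (hp : p ∉ T) (ht : t ∈ T) (hun : ∀ q ∈ pvCls T t, ¬ pvNbr q p) :
    ∀ x, pvR (insert p T) t x → pvR T t x ∧ x ≠ p := by
  intro x hx
  induction hx with
  | refl => exact ⟨Relation.ReflTransGen.refl, fun h => hp (h ▸ ht)⟩
  | @tail b c hxb hadj ihb =>
    obtain ⟨hRb, hbp⟩ := ihb
    have hbT : b ∈ T := by
      rcases Finset.mem_insert.1 hadj.1 with rfl | h
      · exact absurd rfl hbp
      · exact h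
    constructor
    · rcases Finset.mem_insert.1 hadj.2.1 with rfl | hcT
      · exact absurd hadj.2.2 (hun b (mem_pvCls.2 ⟨hbT, hRb⟩))
      · exact hRb.tail ⟨hbT, hcT, hadj.2.2⟩
    · rintro rfl
      exact hun b (mem_pvCls.2 ⟨hbT, hRb⟩) hadj.2.2

theorem pvCls_insert_untouched {T : Finset (Nat × Nat)} {p t : Nat × Nat}
    (hp : p ∉ T) (ht : t ∈ T) (hun : ∀ q ∈ pvCls T t, ¬ pvNbr q p) :
    pvCls (insert p T) t = pvCls T t := by
  ext x
  rw [mem_pvCls, mem_pvCls]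
  constructor
  · rintro ⟨hxT, hr⟩
    obtain ⟨hr', hne⟩ := pvR_insert_untouched hp ht hun x hr
    rcases Finset.mem_insert.1 hxT with rfl | h
    · exact absurd rfl hne
    · exact ⟨h, hr'⟩
  · rintro ⟨hxT, hr⟩
    exact ⟨Finset.mem_insert_of_mem hxT, pvR_mono (Finset.subset_insert _ _) hr⟩

theorem mem_pvCls_insert_self {T : Finset (Nat × Nat)} {p x : Nat × Nat} (hp : p ∉ T) :
    x ∈ pvCls (insert p T) p ↔ x = p ∨ (x ∈ T ∧ ∃ w ∈ pvCls T x, pvNbr w p) := by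
  constructor
  · intro hx
    obtain ⟨hxT, hr⟩ := mem_pvCls.1 hx
    clear hxT hx
    induction hr with
    | refl => exact Or.inl rfl
    | @tail b c hxb hadj ihb =>
      rcases Finset.mem_insert.1 hadj.2.1 with rfl | hcT
      · exact Or.inl rfl
      · rcases ihb with rfl | ⟨hbT, w, hw, hnw⟩
        · exact Or.inr ⟨hcT, c, mem_pvCls_self hcT, pvNbr_symm hadj.2.2⟩
        · have hbT' : b ∈ T := hbT
          have : pvCls T c = pvCls T b :=
            pvCls_eq_of_R (Relation.ReflTransGen.single ⟨hcT, hbT', pvNbr_symm hadj.2.2⟩)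
          exact Or.inr ⟨hcT, w, this ▸ hw, hnw⟩
  · rintro (rfl | ⟨hxT, w, hw, hnw⟩)
    · exact mem_pvCls_self (Finset.mem_insert_self _ _)
    · obtain ⟨hwT, hrxw⟩ := mem_pvCls.1 hw
      refine mem_pvCls.2 ⟨Finset.mem_insert_of_mem hxT, ?_⟩
      have h1 : pvR (insert p T) p w := Relation.ReflTransGen.single
        ⟨Finset.mem_insert_self _ _, Finset.mem_insert_of_mem hwT, pvNbr_symm hnw⟩
      exact h1.trans (pvR_mono (Finset.subset_insert _ _) (pvR_symm hrxw))

def pvTouchB (i j : Nat) (c : Finset Nat × Finset Nat) : Bool := decide (i ∈ c.1 ∨ j ∈ c.2)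

theorem pvPlace_fold (i j : Nat) :
    ∀ (cs : List (Finset Nat × Finset Nat)) (acc : List (Finset Nat × Finset Nat))
      (rs cs0 : Finset Nat),
      cs.foldl (fun (st : List (Finset Nat × Finset Nat) × Finset Nat × Finset Nat) c =>
        if i ∈ c.1 ∨ j ∈ c.2 then (st.1, st.2.1 ∪ c.1, st.2.2 ∪ c.2)
        else (st.1 ++ [c], st.2)) (acc, rs, cs0) =
      (acc ++ cs.filter (fun c => !(pvTouchB i j c)),
        (cs.filter (pvTouchB i j)).foldl (fun r c => r ∪ c.1) rs,
        (cs.filter (pvTouchB i j)).foldl (fun r c => r ∪ c.2) cs0) := by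
  intro cs
  induction cs with
  | nil => intro acc rs cs0; simp
  | cons c cs ih =>
    intro acc rs cs0
    by_cases h : i ∈ c.1 ∨ j ∈ c.2
    · simp only [List.foldl_cons, if_pos h, List.filter_cons,
        show pvTouchB i j c = true by simpa [pvTouchB] using h, ih]
      simp
    · simp only [List.foldl_cons, if_neg h, List.filter_cons,
        show pvTouchB i j c = false by simpa [pvTouchB] using h, ih]
      simp

theorem mem_foldl_union {α γ : Type} [DecidableEq γ] (f : α → Finset γ) :
    ∀ (ls : List α) (init : Finset γ) (x : γ),
      x ∈ ls.foldl (fun r c => r ∪ f c) init ↔ x ∈ init ∨ ∃ c ∈ ls, x ∈ f c := by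
  intro ls
  induction ls with
  | nil => intro init x; simp
  | cons c cs ih =>
    intro init x
    simp only [List.foldl_cons, ih, Finset.mem_union, List.mem_cons]
    constructor
    · rintro ((h | h) | ⟨d, hd, hx⟩)
      · exact Or.inl h
      · exact Or.inr ⟨c, Or.inl rfl, h⟩
      · exact Or.inr ⟨d, Or.inr hd, hx⟩
    · rintro (h | ⟨d, (rfl | hd), hx⟩)
      · exact Or.inl (Or.inl h)
      · exact Or.inl (Or.inr hx)
      · exact Or.inr ⟨d, hd, hx⟩

def pvProj (c : Finset (Nat × Nat)) : Finset Nat × Finset Nat :=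
  (c.image Prod.fst, c.image Prod.snd)

def InvB (matrix : List (List Int)) (T : Finset (Nat × Nat))
    (comps : List (Finset Nat × Finset Nat)) : Prop :=
  T ⊆ pvS matrix ∧ ∃ L : List (Finset (Nat × Nat)), comps = L.map pvProj ∧ L.Nodup ∧
    (∀ c ∈ L, ∃ p ∈ T, c = pvCls T p) ∧ (∀ p ∈ T, pvCls T p ∈ L)

theorem pvTouchB_proj (p : Nat × Nat) (c : Finset (Nat × Nat)) :
    pvTouchB p.1 p.2 (pvProj c) = true ↔ ∃ q ∈ c, pvNbr q p := by
  simp only [pvTouchB, pvProj, decide_eq_true_eq, Finset.mem_image, pvNbr]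
  constructor
  · rintro (⟨q, hq, h⟩ | ⟨q, hq, h⟩)
    · exact ⟨q, hq, Or.inl h⟩
    · exact ⟨q, hq, Or.inr h⟩
  · rintro ⟨q, hq, h | h⟩
    · exact Or.inl ⟨q, hq, h⟩
    · exact Or.inr ⟨q, hq, h⟩

theorem InvB_insert (matrix : List (List Int)) {T : Finset (Nat × Nat)}
    {comps : List (Finset Nat × Finset Nat)} {p : Nat × Nat}
    (hpS : p ∈ pvS matrix) (hpT : p ∉ T) (hinv : InvB matrix T comps) :
    InvB matrix (insert p T) (pvPlace (matrix.getD p.1 []) comps p.1 p.2) := by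
  obtain ⟨hTS, L, hLmap, hLnd, hLcls, hLall⟩ := hinv
  have hstone : ((matrix.getD p.1 []).getD p.2 0 == 1) = true := (mem_pvS.1 hpS).2.2
  unfold pvPlace
  rw [if_pos hstone, pvPlace_fold]
  -- the filtered and touched parts of comps come from L
  have hfilter : comps.filter (fun c => !(pvTouchB p.1 p.2 c)) =
      (L.filter (fun c => !(pvTouchB p.1 p.2 (pvProj c)))).map pvProj := by
    rw [hLmap, List.filter_map]; rfl
  have htouch : comps.filter (pvTouchB p.1 p.2) =
      (L.filter (fun c => pvTouchB p.1 p.2 (pvProj c))).map pvProj := by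
    rw [hLmap, List.filter_map]; rfl
  set tL := L.filter (fun c => pvTouchB p.1 p.2 (pvProj c)) with htL
  set uL := L.filter (fun c => !(pvTouchB p.1 p.2 (pvProj c))) with huL
  -- membership in the merged row/col sets
  have hmem_tL : ∀ x : Nat × Nat, (∃ c ∈ tL, x ∈ c) ↔ (x ∈ T ∧ ∃ w ∈ pvCls T x, pvNbr w p) := by
    intro x
    constructor
    · rintro ⟨c, hc, hxc⟩
      obtain ⟨hcL, hcT⟩ := List.mem_filter.1 hc
      obtain ⟨t, htT, rfl⟩ := hLcls c hcL
      obtain ⟨w, hw, hnw⟩ := (pvTouchB_proj p _).1 hcT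
      have hxT : x ∈ T := (mem_pvCls.1 hxc).1
      have : pvCls T x = pvCls T t := pvCls_eq_of_R (pvR_symm (mem_pvCls.1 hxc).2)
      exact ⟨hxT, w, this ▸ hw, hnw⟩
    · rintro ⟨hxT, w, hw, hnw⟩
      refine ⟨pvCls T x, List.mem_filter.2 ⟨hLall x hxT, (pvTouchB_proj p _).2 ⟨w, hw, hnw⟩⟩,
        mem_pvCls_self hxT⟩
  have hRS : (comps.filter (pvTouchB p.1 p.2)).foldl (fun r c => r ∪ c.1) {p.1} =
      (pvCls (insert p T) p).image Prod.fst := by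
    rw [htouch, List.foldl_map]
    ext x
    rw [mem_foldl_union (fun c => (pvProj c).1)]
    simp only [Finset.mem_singleton, pvProj, Finset.mem_image]
    constructor
    · rintro (rfl | ⟨c, hc, q, hq, rfl⟩)
      · exact ⟨p, mem_pvCls_self (Finset.mem_insert_self _ _), rfl⟩
      · refine ⟨q, (mem_pvCls_insert_self hpT).2 (Or.inr ((hmem_tL q).1 ⟨c, hc, hq⟩)), rfl⟩
    · rintro ⟨q, hq, rfl⟩
      rcases (mem_pvCls_insert_self hpT).1 hq with rfl | hq2
      · exact Or.inl rfl
      · obtain ⟨c, hc, hqc⟩ := (hmem_tL q).2 hq2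
        exact Or.inr ⟨c, hc, q, hqc, rfl⟩
  have hCS : (comps.filter (pvTouchB p.1 p.2)).foldl (fun r c => r ∪ c.2) {p.2} =
      (pvCls (insert p T) p).image Prod.snd := by
    rw [htouch, List.foldl_map]
    ext x
    rw [mem_foldl_union (fun c => (pvProj c).2)]
    simp only [Finset.mem_singleton, pvProj, Finset.mem_image]
    constructor
    · rintro (rfl | ⟨c, hc, q, hq, rfl⟩)
      · exact ⟨p, mem_pvCls_self (Finset.mem_insert_self _ _), rfl⟩
      · refine ⟨q, (mem_pvCls_insert_self hpT).2 (Or.inr ((hmem_tL q).1 ⟨c, hc, hq⟩)), rfl⟩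
    · rintro ⟨q, hq, rfl⟩
      rcases (mem_pvCls_insert_self hpT).1 hq with rfl | hq2
      · exact Or.inl rfl
      · obtain ⟨c, hc, hqc⟩ := (hmem_tL q).2 hq2
        exact Or.inr ⟨c, hc, q, hqc, rfl⟩
  refine ⟨Finset.insert_subset hpS hTS,
    uL ++ [pvCls (insert p T) p], ?_, ?_, ?_, ?_⟩
  · -- the new comps are the projections of the new class list
    rw [List.nil_append, hfilter, hRS, hCS, List.map_append]
    rfl
  · -- Nodup
    rw [List.nodup_append]
    refine ⟨hLnd.filter _, List.nodup_singleton _, ?_⟩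
    intro c hc d hd
    obtain rfl : d = pvCls (insert p T) p := by simpa using hd
    rintro rfl
    obtain ⟨hcL, _⟩ := List.mem_filter.1 hc
    obtain ⟨t, htT, hct⟩ := hLcls _ hcL
    have hpc : p ∈ pvCls (insert p T) p := mem_pvCls_self (Finset.mem_insert_self _ _)
    rw [hct] at hpc
    exact hpT (mem_pvCls.1 hpc).1
  · -- every listed class is a class of insert p T
    intro c hc
    rcases List.mem_append.1 hc with hc | hc
    · obtain ⟨hcL, hcnt⟩ := List.mem_filter.1 hc
      obtain ⟨t, htT, rfl⟩ := hLcls c hcL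
      have hun : ∀ q ∈ pvCls T t, ¬ pvNbr q p := by
        intro q hq hnq
        have := (pvTouchB_proj p (pvCls T t)).2 ⟨q, hq, hnq⟩
        simp [this] at hcnt
      exact ⟨t, Finset.mem_insert_of_mem htT, (pvCls_insert_untouched hpT htT hun).symm⟩
    · rw [List.mem_singleton.1 hc]
      exact ⟨p, Finset.mem_insert_self _ _, rfl⟩
  · -- every class of insert p T is listed
    intro q hq
    rcases Finset.mem_insert.1 hq with rfl | hqT
    · exact List.mem_append.2 (Or.inr (List.mem_singleton.2 rfl))
    · by_cases htc : pvTouchB p.1 p.2 (pvProj (pvCls T q)) = true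
      · -- q's old class touches p: its new class is the merged class
        obtain ⟨w, hw, hnw⟩ := (pvTouchB_proj p _).1 htc
        have hqmem : q ∈ pvCls (insert p T) p :=
          (mem_pvCls_insert_self hpT).2 (Or.inr ⟨hqT, w, hw, hnw⟩)
        have : pvCls (insert p T) q = pvCls (insert p T) p :=
          (pvCls_eq_of_R (mem_pvCls.1 hqmem).2).symm
        rw [this]
        exact List.mem_append.2 (Or.inr (List.mem_singleton.2 rfl))
      · -- untouched: the old class survives
        have hun : ∀ r ∈ pvCls T q, ¬ pvNbr r p := by
          intro r hr hnr
          exact htc ((pvTouchB_proj p _).2 ⟨r, hr, hnr⟩)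
        rw [pvCls_insert_untouched hpT hqT hun]
        exact List.mem_append.2 (Or.inl (List.mem_filter.2 ⟨hLall q hqT, by simp [htc]⟩))

theorem loopB (matrix : List (List Int)) :
    ∀ (cells : List (Nat × Nat)) (T : Finset (Nat × Nat))
      (comps : List (Finset Nat × Finset Nat)),
      InvB matrix T comps →
      (∀ p ∈ cells, p ∉ T ∧ p.1 < matrix.length ∧ p.2 < (matrix.headD []).length) →
      cells.Nodup →
      InvB matrix (T ∪ cells.toFinset.filter (fun p => pvStone matrix p.1 p.2))
        (cells.foldl (fun comps p => pvPlace (matrix.getD p.1 []) comps p.1 p.2) comps) := by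
  intro cells
  induction cells with
  | nil =>
    intro T comps hinv _ _
    simpa using hinv
  | cons c cs ih =>
    intro T comps hinv hcells hnd
    obtain ⟨hcT, hc1, hc2⟩ := hcells c List.mem_cons_self
    simp only [List.foldl_cons]
    by_cases hst : pvStone matrix c.1 c.2
    · have hcS : c ∈ pvS matrix := mem_pvS.2 ⟨hc1, hc2, hst⟩
      have hinv' := InvB_insert matrix hcS hcT hinv
      have hih := ih (insert c T) _ hinv'
        (fun p hp => ⟨by
          intro hmem
          rcases Finset.mem_insert.1 hmem with rfl | h
          · exact (List.nodup_cons.1 hnd).1 hp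
          · exact (hcells p (List.mem_cons_of_mem _ hp)).1 h,
          (hcells p (List.mem_cons_of_mem _ hp)).2.1,
          (hcells p (List.mem_cons_of_mem _ hp)).2.2⟩)
        (List.nodup_cons.1 hnd).2
      have hset : insert c T ∪ cs.toFinset.filter (fun p => pvStone matrix p.1 p.2) =
          T ∪ (c :: cs).toFinset.filter (fun p => pvStone matrix p.1 p.2) := by
        ext x
        simp only [Finset.mem_union, Finset.mem_insert, Finset.mem_filter,
          List.toFinset_cons, List.mem_toFinset]
        rcases eq_or_ne x c with rfl | hne
        · simp [hst]
        · simp only [hne, false_or]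
          try tauto
      rw [hset] at hih
      exact hih
    · -- not a stone: nothing happens
      have hplace : pvPlace (matrix.getD c.1 []) comps c.1 c.2 = comps := by
        unfold pvPlace
        rw [if_neg (by simpa [pvStone] using hst)]
      rw [hplace]
      have hih := ih T comps hinv
        (fun p hp => hcells p (List.mem_cons_of_mem _ hp)) (List.nodup_cons.1 hnd).2
      have hset : T ∪ cs.toFinset.filter (fun p => pvStone matrix p.1 p.2) =
          T ∪ (c :: cs).toFinset.filter (fun p => pvStone matrix p.1 p.2) := by
        ext x
        simp only [Finset.mem_union, Finset.mem_filter, List.toFinset_cons,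
          List.mem_toFinset, Finset.mem_insert]
        rcases eq_or_ne x c with rfl | hne
        · simp [hst]
        · simp only [hne, false_or]
          try tauto
      rw [hset] at hih
      exact hih

theorem stoneMatrix_alt_eq_card (matrix : List (List Int)) :
    stoneMatrix_alt matrix = (((pvS matrix).image (pvCls (pvS matrix))).card : Int) := by
  show (((List.range matrix.length).foldl (fun comps i =>
    (List.range (matrix.headD []).length).foldl
      (fun comps j => pvPlace (matrix.getD i []) comps i j) comps)
    ([] : List (Finset Nat × Finset Nat))).length : Int) = _
  rw [foldl_nested (fun comps i j => pvPlace (matrix.getD i []) comps i j)]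
  set cells := (List.range matrix.length).flatMap
    (fun a => (List.range (matrix.headD []).length).map fun b => (a, b)) with hcells
  have hmemcells : ∀ p : Nat × Nat,
      p ∈ cells ↔ p.1 < matrix.length ∧ p.2 < (matrix.headD []).length := by
    rintro ⟨a, b⟩
    simp [hcells, List.mem_flatMap]
  have hnd : cells.Nodup := by
    have : cells = (List.range matrix.length).product
        (List.range (matrix.headD []).length) := rfl
    rw [this]
    exact (List.nodup_range).product (List.nodup_range)
  have hinv0 : InvB matrix (∅ : Finset (Nat × Nat)) [] :=
    ⟨Finset.empty_subset _, [], by simp, List.nodup_nil, by simp, by simp⟩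
  have hloop := loopB matrix cells ∅ [] hinv0
    (fun p hp => ⟨Finset.notMem_empty p, ((hmemcells p).1 hp).1, ((hmemcells p).1 hp).2⟩) hnd
  have hTS : (∅ : Finset (Nat × Nat)) ∪
      cells.toFinset.filter (fun p => pvStone matrix p.1 p.2) = pvS matrix := by
    ext p
    simp only [Finset.empty_union, Finset.mem_filter, List.mem_toFinset, hmemcells, mem_pvS]
    tauto
  rw [hTS] at hloop
  obtain ⟨hTS', L, hLmap, hLnd, hLcls, hLall⟩ := hloop
  rw [hLmap, List.length_map]
  have hLfin : L.toFinset = (pvS matrix).image (pvCls (pvS matrix)) := by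
    ext c
    simp only [List.mem_toFinset, Finset.mem_image]
    constructor
    · intro hc
      obtain ⟨q, hq, rfl⟩ := hLcls c hc
      exact ⟨q, hq, rfl⟩
    · rintro ⟨q, hq, rfl⟩
      exact hLall q hq
  rw [← hLfin, List.toFinset_card_of_nodup hLnd]

-- ===== VERDICT (by name: the statement is the Claim_ definition above) =====
theorem stoneMatrix_spec : Claim_equal_stoneMatrix := by
  intro matrix _ _
  unfold Spec_stoneMatrix
  rw [stoneMatrix_eq_card, stoneMatrix_alt_eq_card]
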